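-- pv_equiv track=rewrite | github.com/GenAIPHBuilders-org/team-Autonominds-2025 | run_pipeline.py | clean_terms
-- ===== SOURCE A (Python) =====
-- from typing import Dict, List
--
-- STOP_TIER1 = {
--     "survey", "review", "framework", "architecture", "architectures",
--     "analysis", "analyses", "system", "systems",
-- }
--
-- STOP_TIER2 = {
--     "method", "methods", "approach", "approaches",
--     "algorithm", "algorithms", "technique", "techniques",
-- }
--
-- def clean_terms(terms: List[str]) -> List[str]:
--     """
--     Remove any term containing a Tier-1 word.
--     If that yields none, remove only Tier-2 words.
--     Finally, if still empty, return the raw list.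
--     """
--     # First pass: strip Tier-1
--     tier1_clean = [t for t in terms if set(t.split()).isdisjoint(STOP_TIER1)]
--     if tier1_clean:
--         return tier1_clean
--     # Second pass: strip Tier-2
--     tier2_clean = [t for t in terms if set(t.split()).isdisjoint(STOP_TIER2)]
--     if tier2_clean:
--         return tier2_clean
--     # Fallback to raw if everything got removed
--     return terms
-- ===== SOURCE B (Python) =====
-- STOP_TIER1 = {
--     "survey", "review", "framework", "architecture", "architectures",
--     "analysis", "analyses", "system", "systems",
-- }
--
-- STOP_TIER2 = {
--     "method", "methods", "approach", "approaches",
--     "algorithm", "algorithms", "technique", "techniques",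
-- }
--
-- def _rank(t):
--     # 0 = free of Tier-1 words, 1 = hits Tier-1 but free of Tier-2, 2 = hits both tiers.
--     words = set(t.split())
--     if words.isdisjoint(STOP_TIER1):
--         return 0
--     if words.isdisjoint(STOP_TIER2):
--         return 1
--     return 2
--
-- def clean_terms(terms):
--     # Rank every term, then keep exactly the terms of the best (minimum) rank.
--     if not terms:
--         return terms
--     ranks = [_rank(t) for t in terms]
--     m = min(ranks)
--     return [t for t, r in zip(terms, ranks) if r == m]
-- ===== Notes on version B (the rewrite author's own statement) =====
-- stated objective: alternative
-- what changed: Replaced the staged filter-then-fallback chain by a min-key selection: each term gets a rank (0 = Tier-1-free, 1 = Tier-2-free only, 2 = neither) and the result is the terms achieving the minimum rank.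
import Mathlib
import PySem

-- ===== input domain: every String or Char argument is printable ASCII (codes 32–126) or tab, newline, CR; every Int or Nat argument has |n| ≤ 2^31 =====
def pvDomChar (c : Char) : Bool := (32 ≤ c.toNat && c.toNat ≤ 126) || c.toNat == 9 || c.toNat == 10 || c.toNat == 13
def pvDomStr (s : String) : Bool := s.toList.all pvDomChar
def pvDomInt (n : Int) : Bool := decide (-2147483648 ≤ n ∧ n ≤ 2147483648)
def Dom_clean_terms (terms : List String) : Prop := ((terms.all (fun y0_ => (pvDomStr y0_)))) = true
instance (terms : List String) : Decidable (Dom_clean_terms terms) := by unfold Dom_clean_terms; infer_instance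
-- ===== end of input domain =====

-- B replaces A's staged filter-then-fallback chain by a min-key selection: rank every
-- term (0 = Tier-1-free, 1 = Tier-2-free only, 2 = neither) and keep the minimum-rank terms.

def stopTier1 : PySem.Set String :=
  PySem.Set.ofList ["survey", "review", "framework", "architecture", "architectures",
    "analysis", "analyses", "system", "systems"]

def stopTier2 : PySem.Set String :=
  PySem.Set.ofList ["method", "methods", "approach", "approaches",
    "algorithm", "algorithms", "technique", "techniques"]

-- ===== PORT A =====
def clean_terms (terms : List String) : List String :=
  let tier1_clean := terms.filter (fun t =>
    PySem.Set.isdisjoint (PySem.Set.ofList (PySem.Str.split₀ t)) stopTier1)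
  if tier1_clean ≠ [] then tier1_clean
  else
    let tier2_clean := terms.filter (fun t =>
      PySem.Set.isdisjoint (PySem.Set.ofList (PySem.Str.split₀ t)) stopTier2)
    if tier2_clean ≠ [] then tier2_clean
    else terms

-- ===== PORT B =====
def rankTerm (t : String) : Int :=
  let words := PySem.Set.ofList (PySem.Str.split₀ t)
  if PySem.Set.isdisjoint words stopTier1 then 0
  else if PySem.Set.isdisjoint words stopTier2 then 1
  else 2

def clean_terms_alt (terms : List String) : List String :=
  if terms = [] then terms
  else
    let ranks := terms.map rankTerm
    match PySem.List.min? ranks (fun x => x) with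
    | none => terms
    | some m => ((terms.zip ranks).filter (fun p => p.2 == m)).map Prod.fst

-- ===== PRECONDITION & SPEC =====
def Spec_clean_terms (terms : List String) (out : List String) : Prop := out = clean_terms_alt terms
instance (terms : List String) (out : List String) : Decidable (Spec_clean_terms terms out) := by unfold Spec_clean_terms; infer_instance

-- ===== CLAIM (what is proved, stated in full; the proofs are below) =====
def Claim_equal_clean_terms : Prop := ∀ (terms : List String), Dom_clean_terms terms → Spec_clean_terms terms (clean_terms terms)

-- ===== LEMMAS AND PROOFS =====

theorem zip_map_filter_fst (terms : List String) (m : Int) :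
    (((terms.zip (terms.map rankTerm)).filter (fun p => p.2 == m)).map Prod.fst)
      = terms.filter (fun t => rankTerm t == m) := by
  induction terms with
  | nil => rfl
  | cons t ts ih =>
    simp only [List.map_cons, List.zip_cons_cons, List.filter_cons]
    by_cases h : rankTerm t == m <;> simp [h, ih]

theorem rankTerm_nonneg (t : String) : 0 ≤ rankTerm t := by
  simp only [rankTerm]; split_ifs <;> norm_num

theorem rankTerm_eq_zero_iff (t : String) :
    rankTerm t = 0 ↔ PySem.Set.isdisjoint (PySem.Set.ofList (PySem.Str.split₀ t)) stopTier1 = true := by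
  simp only [rankTerm]; split_ifs <;> simp_all

theorem rankTerm_eq_one_iff (t : String)
    (h1 : PySem.Set.isdisjoint (PySem.Set.ofList (PySem.Str.split₀ t)) stopTier1 = false) :
    rankTerm t = 1 ↔ PySem.Set.isdisjoint (PySem.Set.ofList (PySem.Str.split₀ t)) stopTier2 = true := by
  simp only [rankTerm]; split_ifs <;> simp_all

theorem rankTerm_ge_one (t : String)
    (h1 : PySem.Set.isdisjoint (PySem.Set.ofList (PySem.Str.split₀ t)) stopTier1 = false) :
    1 ≤ rankTerm t := by
  simp only [rankTerm]; split_ifs <;> simp_all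

theorem rankTerm_eq_two (t : String)
    (h1 : PySem.Set.isdisjoint (PySem.Set.ofList (PySem.Str.split₀ t)) stopTier1 = false)
    (h2 : PySem.Set.isdisjoint (PySem.Set.ofList (PySem.Str.split₀ t)) stopTier2 = false) :
    rankTerm t = 2 := by
  simp only [rankTerm]; split_ifs <;> simp_all

-- ===== VERDICT (by name: the statement is the Claim_ definition above) =====
theorem clean_terms_spec : Claim_equal_clean_terms := by
  intro terms _
  unfold Spec_clean_terms clean_terms clean_terms_alt
  by_cases hnil : terms = []
  · subst hnil; rfl
  · simp only [if_neg hnil]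
    obtain ⟨m, hm⟩ : ∃ m, PySem.List.min? (terms.map rankTerm) (fun x => x) = some m := by
      cases hmin : PySem.List.min? (terms.map rankTerm) (fun x => x) with
      | none => exact absurd ((PySem.List.min?_eq_none_iff _ _).mp hmin) (by simp [hnil])
      | some m => exact ⟨m, rfl⟩
    rw [hm]
    simp only [zip_map_filter_fst]
    have hmem := PySem.List.min?_mem hm
    have hmin := PySem.List.min?_isMin hm
    obtain ⟨t0, ht0mem, ht0⟩ := List.mem_map.mp hmem
    by_cases h1 : terms.filter (fun t =>
        PySem.Set.isdisjoint (PySem.Set.ofList (PySem.Str.split₀ t)) stopTier1) = []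
    · have hall1 : ∀ t ∈ terms,
          PySem.Set.isdisjoint (PySem.Set.ofList (PySem.Str.split₀ t)) stopTier1 = false := by
        intro t ht
        have := List.filter_eq_nil_iff.mp h1 t ht
        simp only [Bool.not_eq_true] at this; exact this
      by_cases h2 : terms.filter (fun t =>
          PySem.Set.isdisjoint (PySem.Set.ofList (PySem.Str.split₀ t)) stopTier2) = []
      · have hall2 : ∀ t ∈ terms,
            PySem.Set.isdisjoint (PySem.Set.ofList (PySem.Str.split₀ t)) stopTier2 = false := by
          intro t ht
          have := List.filter_eq_nil_iff.mp h2 t ht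
          simp only [Bool.not_eq_true] at this; exact this
        have hm2 : m = 2 := by
          rw [← ht0]; exact rankTerm_eq_two t0 (hall1 t0 ht0mem) (hall2 t0 ht0mem)
        simp only [h1, h2, ne_eq, not_true_eq_false, if_false]
        have : terms.filter (fun t => rankTerm t == m) = terms := by
          apply List.filter_eq_self.mpr
          intro t ht
          simp [rankTerm_eq_two t (hall1 t ht) (hall2 t ht), hm2]
        rw [this]
      · obtain ⟨t1, ht1mem, ht1⟩ : ∃ t ∈ terms,
            PySem.Set.isdisjoint (PySem.Set.ofList (PySem.Str.split₀ t)) stopTier2 = true := by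
          obtain ⟨t1, ht1⟩ := List.exists_mem_of_ne_nil _ h2
          have := List.mem_filter.mp ht1
          exact ⟨t1, this.1, this.2⟩
        have hm1 : m = 1 := by
          have hle : m ≤ rankTerm t1 := hmin _ (List.mem_map_of_mem ht1mem)
          have hr1 : rankTerm t1 = 1 := (rankTerm_eq_one_iff t1 (hall1 t1 ht1mem)).mpr ht1
          have hge : 1 ≤ m := by rw [← ht0]; exact rankTerm_ge_one t0 (hall1 t0 ht0mem)
          omega
        simp only [h1, h2, ne_eq, not_true_eq_false, if_false, not_false_eq_true, if_true]
        apply Eq.symm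
        apply List.filter_congr
        intro t ht
        have := rankTerm_eq_one_iff t (hall1 t ht)
        subst hm1
        cases hd : PySem.Set.isdisjoint (PySem.Set.ofList (PySem.Str.split₀ t)) stopTier2 <;>
          simp_all
    · obtain ⟨t1, ht1mem, ht1⟩ : ∃ t ∈ terms,
          PySem.Set.isdisjoint (PySem.Set.ofList (PySem.Str.split₀ t)) stopTier1 = true := by
        obtain ⟨t1, ht1⟩ := List.exists_mem_of_ne_nil _ h1
        have := List.mem_filter.mp ht1
        exact ⟨t1, this.1, this.2⟩
      have hm0 : m = 0 := by
        have hle : m ≤ rankTerm t1 := hmin _ (List.mem_map_of_mem ht1mem)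
        have hr0 : rankTerm t1 = 0 := (rankTerm_eq_zero_iff t1).mpr ht1
        have hge : 0 ≤ m := by rw [← ht0]; exact rankTerm_nonneg t0
        omega
      simp only [h1, ne_eq, not_false_eq_true, if_true]
      apply Eq.symm
      apply List.filter_congr
      intro t _
      have := rankTerm_eq_zero_iff t
      subst hm0
      cases hd : PySem.Set.isdisjoint (PySem.Set.ofList (PySem.Str.split₀ t)) stopTier1 <;>
        simp_all
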